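-- pv_equiv track=rewrite | github.com/TebooNok/HiQA | service/knowledge_client.py | remove_repeated_substrings
-- ===== SOURCE A (Python) =====
-- def remove_repeated_substrings(s):
--     def longest_repeated_substring(text):
--         n = len(text)
--         table = [[0] * n for _ in range(n)]
--         longest_substring = ''
--         longest_length = 0
--
--         for i in range(n):
--             for j in range(i + 1, n):
--                 if text[i] == text[j]:
--                     if i == 0 or j == 0:
--                         table[i][j] = 1
--                     else:
--                         table[i][j] = table[i - 1][j - 1] + 1
--
--                     if table[i][j] > longest_length:
--                         longest_substring = text[i - table[i][j] + 1: i + 1]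
--                         longest_length = table[i][j]
--                 else:
--                     table[i][j] = 0
--
--         return longest_substring
--
--     longest_substring = longest_repeated_substring(s)
--     while len(longest_substring) > 2:
--         s = s.replace(longest_substring, '', 1)
--         longest_substring = longest_repeated_substring(s)
--
--     return s
-- ===== SOURCE B (Python) =====
-- def remove_repeated_substrings(s):
--     # Diagonal (offset-major) scan with O(1) extra state instead of an
--     # O(n^2) DP table; tracks (length, end) with an explicit lexicographic
--     # tie-break (longer, else smaller end), and removes by splicing at the
--     # known first-occurrence position instead of str.replace.
--     def best_repeat(text):
--         n = len(text)
--         best_len = 0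
--         best_end = -1
--         for d in range(1, n):
--             run = 0
--             for i in range(n - d):
--                 if text[i] == text[i + d]:
--                     run += 1
--                     if run > best_len or (run == best_len and i < best_end):
--                         best_len = run
--                         best_end = i
--                 else:
--                     run = 0
--         return best_len, best_end
--
--     L, e = best_repeat(s)
--     while L > 2:
--         a = e - L + 1
--         s = s[:a] + s[a + L:]
--         L, e = best_repeat(s)
--     return s
-- ===== Notes on version B (the rewrite author's own statement) =====
-- stated objective: alternative
-- what changed: B finds the longest repeated substring by an offset-major diagonal scan keeping only a run counter and the best (length,end) pair with an explicit tie-break, instead of A's O(n^2) DP table, and removes it by splicing at the known first-occurrence index instead of str.replace.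
import Mathlib
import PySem

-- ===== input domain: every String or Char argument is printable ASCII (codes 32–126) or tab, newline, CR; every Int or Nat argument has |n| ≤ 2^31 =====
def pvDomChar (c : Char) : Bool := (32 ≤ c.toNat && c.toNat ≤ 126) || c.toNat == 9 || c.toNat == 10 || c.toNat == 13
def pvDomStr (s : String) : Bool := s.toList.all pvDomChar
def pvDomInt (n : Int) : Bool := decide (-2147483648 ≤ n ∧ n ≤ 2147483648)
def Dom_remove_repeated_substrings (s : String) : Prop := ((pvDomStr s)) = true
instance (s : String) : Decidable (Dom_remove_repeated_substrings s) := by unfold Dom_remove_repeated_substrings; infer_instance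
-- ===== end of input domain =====

-- B replaces A's O(n^2) DP table by a diagonal scan with a run counter and an explicit
-- (length, end) tie-break, and removes by splicing instead of str.replace: alternative
-- structure (O(1) extra space per scan), same results.

-- ===== PORT A =====
-- inner loop body of longest_repeated_substring: state (table, longest_substring, longest_length)
def lrsStep (t : List Char) (i : Nat) (st : List (List Nat) × List Char × Nat) (j : Nat) :
    List (List Nat) × List Char × Nat :=
  let table := st.1
  let best := st.2.1
  let blen := st.2.2
  if t.getD i ' ' = t.getD j ' ' then        -- text[i] == text[j]  (indices always in range)
    let v : Nat := if i = 0 ∨ j = 0 then 1 else ((table.getD (i-1) []).getD (j-1) 0) + 1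
    let table' := table.set i ((table.getD i []).set j v)
    if blen < v then
      (table', PySem.List.slice t (some ((i : Int) - (v : Int) + 1)) (some ((i : Int) + 1)), v)
    else (table', best, blen)
  else (table.set i ((table.getD i []).set j 0), best, blen)

-- longest_repeated_substring(text), on the char list
def lrs (t : List Char) : List Char :=
  let n := t.length
  let init : List (List Nat) × List Char × Nat := (List.replicate n (List.replicate n 0), [], 0)
  ((List.range n).foldl
    (fun st i => (List.range' (i+1) (n - (i+1))).foldl (lrsStep t i) st) init).2.1

-- s.replace(sub, '', 1): remove the first occurrence of sub (exact, incl. absent / empty sub)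
def replaceFirst (s sub : List Char) : List Char :=
  let k := PySem.Chars.find s sub
  if k = -1 then s else s.take k.toNat ++ s.drop (k.toNat + sub.length)

-- the while loop; fuel = |s|+1 strictly bounds the iteration count (each pass removes ≥ 3 chars)
def removeLoopA : Nat → List Char → List Char
  | 0, s => s
  | fuel+1, s =>
    let sub := lrs s
    if 2 < sub.length then removeLoopA fuel (replaceFirst s sub) else s

def remove_repeated_substrings (s : String) : String :=
  String.ofList (removeLoopA (s.toList.length + 1) s.toList)

-- ===== PORT B =====
-- inner loop body of best_repeat along the diagonal at offset d: state ((best_len, best_end), run)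
def diagStep (t : List Char) (d : Nat) (st : (Nat × Int) × Nat) (i : Nat) : (Nat × Int) × Nat :=
  let bl := st.1.1
  let be := st.1.2
  let run := st.2
  if t.getD i ' ' = t.getD (i + d) ' ' then    -- text[i] == text[i+d]
    let run' := run + 1
    if bl < run' ∨ (run' = bl ∧ (i : Int) < be) then ((run', (i : Int)), run') else ((bl, be), run')
  else ((bl, be), 0)

-- best_repeat(text) = (best_len, best_end)
def bestRepeat (t : List Char) : Nat × Int :=
  let n := t.length
  (List.range' 1 (n - 1)).foldl
    (fun bb d => ((List.range (n - d)).foldl (diagStep t d) (bb, 0)).1) (0, -1)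

def removeLoopB : Nat → List Char → List Char
  | 0, s => s
  | fuel+1, s =>
    let p := bestRepeat s
    if 2 < p.1 then
      let a : Int := p.2 - (p.1 : Int) + 1
      removeLoopB fuel (PySem.List.slice s none (some a) ++ PySem.List.slice s (some (a + (p.1 : Int))) none)
    else s

def remove_repeated_substrings_alt (s : String) : String :=
  String.ofList (removeLoopB (s.toList.length + 1) s.toList)

-- ===== PRECONDITION & SPEC =====
def Spec_remove_repeated_substrings (s : String) (out : String) : Prop := out = remove_repeated_substrings_alt s
instance (s : String) (out : String) : Decidable (Spec_remove_repeated_substrings s out) := by unfold Spec_remove_repeated_substrings; infer_instance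

-- ===== CLAIM (what is proved, stated in full; the proofs are below) =====
def Claim_equal_remove_repeated_substrings : Prop := ∀ (s : String), Dom_remove_repeated_substrings s → Spec_remove_repeated_substrings s (remove_repeated_substrings s)

-- ===== LEMMAS AND PROOFS =====

-- length of the longest common suffix of t[..i] and t[..j]  (the value A's table[i][j] holds)
def csl (t : List Char) : Nat → Nat → Nat
  | 0, j => if t.getD 0 ' ' = t.getD j ' ' then 1 else 0
  | (i+1), j => if t.getD (i+1) ' ' = t.getD j ' ' then csl t i (j-1) + 1 else 0

def pairVal (t : List Char) (p : Nat × Nat) : Nat := csl t p.1 p.2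

-- the substring of length v ending at index i
def extract (t : List Char) (i v : Nat) : List Char := (t.drop (i + 1 - v)).take v

-- abstract best-update rules: A keeps only a strict length improvement (scan order does the
-- tie-break), B improves on equal length with a smaller end
def ruleA (t : List Char) (st : Nat × Int) (p : Nat × Nat) : Nat × Int :=
  if st.1 < pairVal t p then (pairVal t p, (p.1 : Int)) else st

def ruleB (t : List Char) (st : Nat × Int) (p : Nat × Nat) : Nat × Int :=
  if st.1 < pairVal t p ∨ (pairVal t p = st.1 ∧ (p.1 : Int) < st.2) then (pairVal t p, (p.1 : Int)) else st

-- A's concrete best state (substring, length) as a function of the abstract one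
def renderA (t : List Char) (st : Nat × Int) : List Char × Nat :=
  (if st.1 = 0 then [] else extract t st.2.toNat st.1, st.1)

-- A's concrete rule on (substring, length)
def ruleC (t : List Char) (st : List Char × Nat) (p : Nat × Nat) : List Char × Nat :=
  if st.2 < pairVal t p then
    (PySem.List.slice t (some ((p.1 : Int) - (pairVal t p : Int) + 1)) (some ((p.1 : Int) + 1)), pairVal t p)
  else st

def rowPairs (n i : Nat) : List (Nat × Nat) := (List.range' (i+1) (n - (i+1))).map (fun j => (i, j))
def pairsRow (n : Nat) : List (Nat × Nat) := (List.range' 0 n).flatMap (rowPairs n)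
def pairsDiag (n : Nat) : List (Nat × Nat) :=
  (List.range' 1 (n - 1)).flatMap (fun d => (List.range (n - d)).map (fun i => (i, i + d)))

-- invariant of a best-search fold over a processed pair list ps
def PB (t : List Char) (ps : List (Nat × Nat)) (st : Nat × Int) : Prop :=
  (∀ p ∈ ps, pairVal t p ≤ st.1) ∧
  (st.1 ≠ 0 → ∃ i : Nat, st.2 = (i : Int) ∧ (∃ p ∈ ps, p.1 = i ∧ pairVal t p = st.1) ∧
    (∀ p ∈ ps, pairVal t p = st.1 → i ≤ p.1))

-- same property phrased over all pairs i<j<n (order-free form)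
def PBall (t : List Char) (st : Nat × Int) : Prop :=
  (∀ i j, i < j → j < t.length → csl t i j ≤ st.1) ∧
  (st.1 ≠ 0 → ∃ i : Nat, st.2 = (i : Int) ∧
    (∃ j, i < j ∧ j < t.length ∧ csl t i j = st.1) ∧
    (∀ i' j', i' < j' → j' < t.length → csl t i' j' = st.1 → i ≤ i'))

lemma csl_le (t : List Char) : ∀ i j, csl t i j ≤ i + 1 := by
  intro i
  induction i with
  | zero => intro j; simp [csl]; split <;> simp
  | succ k ih =>
    intro j
    simp only [csl]
    split
    · exact Nat.succ_le_succ (ih (j-1))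
    · omega

lemma mem_pairsRow {n : Nat} {p : Nat × Nat} : p ∈ pairsRow n ↔ p.1 < p.2 ∧ p.2 < n := by
  simp only [pairsRow, rowPairs, List.mem_flatMap, List.mem_map, List.mem_range'_1]
  constructor
  · rintro ⟨i, ⟨hi0, hin⟩, j, ⟨hj1, hj2⟩, rfl⟩
    constructor <;> simp <;> omega
  · rintro ⟨h1, h2⟩
    exact ⟨p.1, ⟨by omega, by omega⟩, p.2, ⟨by omega, by omega⟩, rfl⟩

lemma mem_pairsDiag {n : Nat} {p : Nat × Nat} : p ∈ pairsDiag n ↔ p.1 < p.2 ∧ p.2 < n := by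
  simp only [pairsDiag, List.mem_flatMap, List.mem_map, List.mem_range'_1, List.mem_range]
  constructor
  · rintro ⟨d, ⟨hd1, hd2⟩, i, hi, rfl⟩
    constructor <;> simp <;> omega
  · rintro ⟨h1, h2⟩
    exact ⟨p.2 - p.1, ⟨by omega, by omega⟩, p.1, by omega, by
      show (p.1, p.1 + (p.2 - p.1)) = p
      have : p.1 + (p.2 - p.1) = p.2 := by omega
      rw [this]⟩

lemma pairsRow_sorted (n : Nat) : (pairsRow n).Pairwise (fun a b => a.1 ≤ b.1) := by
  unfold pairsRow
  rw [List.pairwise_flatMap]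
  constructor
  · intro i _
    simp only [rowPairs]
    rw [List.pairwise_map]
    exact List.Pairwise.imp (fun _ => le_refl i) (List.pairwise_lt_range' 1 (by norm_num))
  · refine (List.pairwise_lt_range' (s := 0) (n := n) 1 (by norm_num)).imp_of_mem ?_
    intro a b _ _ hab q hq r hr
    simp only [rowPairs, List.mem_map] at hq hr
    obtain ⟨j, -, rfl⟩ := hq; obtain ⟨j', -, rfl⟩ := hr
    exact Nat.le_of_lt hab

-- one step preserves PB (rule B, any order)
lemma pb_update {t : List Char} {ps : List (Nat × Nat)} {st : Nat × Int} (p : Nat × Nat)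
    (hub : ∀ q ∈ ps, pairVal t q ≤ st.1) (hlt : st.1 < pairVal t p) :
    PB t (ps ++ [p]) (pairVal t p, (p.1 : Int)) := by
  refine ⟨?_, fun _ => ⟨p.1, rfl, ⟨p, by simp, rfl, rfl⟩, ?_⟩⟩
  · intro q hq
    rcases List.mem_append.1 hq with hq | hq
    · exact le_of_lt (lt_of_le_of_lt (hub q hq) hlt)
    · simp at hq; subst hq; exact le_refl _
  · intro q hq hv
    rcases List.mem_append.1 hq with hq | hq
    · exact absurd hv (by have := hub q hq; omega)
    · simp at hq; subst hq; exact le_refl _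

lemma pb_keep_of_le {t : List Char} {ps : List (Nat × Nat)} {st : Nat × Int} (p : Nat × Nat)
    (h : PB t ps st) (hle : pairVal t p ≤ st.1)
    (hend : pairVal t p = st.1 → st.1 ≠ 0 → st.2 ≤ (p.1 : Int)) :
    PB t (ps ++ [p]) st := by
  obtain ⟨hub, hex⟩ := h
  refine ⟨?_, ?_⟩
  · intro q hq
    rcases List.mem_append.1 hq with hq | hq
    · exact hub q hq
    · simp at hq; subst hq; exact hle
  · intro hv
    obtain ⟨i, hi, hatt, hmin⟩ := hex hv
    refine ⟨i, hi, ?_, ?_⟩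
    · obtain ⟨q, hq, h1, h2⟩ := hatt
      exact ⟨q, by simp [hq], h1, h2⟩
    · intro q hq hvq
      rcases List.mem_append.1 hq with hq | hq
      · exact hmin q hq hvq
      · simp at hq; subst hq
        have := hend hvq hv
        omega

lemma stepB_PB {t ps st p} (h : PB t ps st) : PB t (ps ++ [p]) (ruleB t st p) := by
  unfold ruleB
  split
  next hc =>
    rcases hc with hlt | ⟨heq, hlt2⟩
    · exact pb_update p h.1 hlt
    · -- tie with smaller end: new least end is p.1
      obtain ⟨hub, hex⟩ := h
      by_cases h0 : st.1 = 0
      · -- st.1 = 0 and v = 0: plain update to (0, p.1); PB holds trivially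
        refine ⟨?_, ?_⟩
        · intro q hq
          rcases List.mem_append.1 hq with hq | hq
          · exact heq ▸ hub q hq
          · simp at hq; subst hq; exact le_refl _
        · intro hv; exact absurd (heq ▸ h0) hv
      · obtain ⟨i, hi, hatt, hmin⟩ := hex h0
        refine ⟨?_, fun _ => ⟨p.1, rfl, ⟨p, by simp, rfl, rfl⟩, ?_⟩⟩
        · intro q hq
          rcases List.mem_append.1 hq with hq | hq
          · have := hub q hq; omega
          · simp at hq; subst hq; exact le_refl _
        · intro q hq hvq
          rcases List.mem_append.1 hq with hq | hq
          · have hiq := hmin q hq (by omega)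
            have : (p.1 : Int) < (i : Int) := hi ▸ hlt2
            omega
          · simp at hq; subst hq; exact le_refl _
  next hc =>
    push Not at hc
    obtain ⟨hle, htie⟩ := hc
    refine pb_keep_of_le p h (by omega) ?_
    intro hveq h0
    have := htie (by omega)
    omega

lemma stepA_PB {t ps st p} (hs : ∀ q ∈ ps, q.1 ≤ p.1) (h : PB t ps st) :
    PB t (ps ++ [p]) (ruleA t st p) := by
  unfold ruleA
  split
  next hlt => exact pb_update p h.1 hlt
  next hge =>
    refine pb_keep_of_le p h (by omega) ?_
    intro hveq h0
    obtain ⟨i, hi, ⟨q, hq, hqi, -⟩, -⟩ := h.2 h0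
    have := hs q hq
    omega

lemma foldB_PB (t : List Char) : ∀ (ps done : List (Nat × Nat)) (st : Nat × Int),
    PB t done st → PB t (done ++ ps) (ps.foldl (ruleB t) st) := by
  intro ps
  induction ps with
  | nil => intro done st h; simpa using h
  | cons p rest ih =>
    intro done st h
    have h' := stepB_PB (p := p) h
    have := ih (done ++ [p]) _ h'
    simpa [List.append_assoc] using this

lemma foldA_PB (t : List Char) : ∀ (ps done : List (Nat × Nat)) (st : Nat × Int),
    (done ++ ps).Pairwise (fun a b => a.1 ≤ b.1) →
    PB t done st → PB t (done ++ ps) (ps.foldl (ruleA t) st) := by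
  intro ps
  induction ps with
  | nil => intro done st _ h; simpa using h
  | cons p rest ih =>
    intro done st hsort h
    have hqp : ∀ q ∈ done, q.1 ≤ p.1 := by
      intro q hq
      have := (List.pairwise_append.1 hsort).2.2 q hq p (by simp)
      exact this
    have h' := stepA_PB (p := p) hqp h
    have hsort' : ((done ++ [p]) ++ rest).Pairwise (fun a b => a.1 ≤ b.1) := by
      simpa [List.append_assoc] using hsort
    have := ih (done ++ [p]) _ hsort' h'
    simpa [List.append_assoc] using this

-- two states sharing the order-free best property agree (up to the end at length 0)
lemma best_unique {t st1 st2} (h1 : PBall t st1) (h2 : PBall t st2) :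
    st1.1 = st2.1 ∧ (st1.1 ≠ 0 → st1.2 = st2.2) := by
  obtain ⟨ub1, ex1⟩ := h1
  obtain ⟨ub2, ex2⟩ := h2
  have hL : st1.1 = st2.1 := by
    rcases Nat.eq_zero_or_pos st1.1 with h0 | hpos
    · rcases Nat.eq_zero_or_pos st2.1 with h0' | hpos'
      · omega
      · obtain ⟨i, -, ⟨j, hij, hjn, hv⟩, -⟩ := ex2 (by omega)
        have := ub1 i j hij hjn
        omega
    · obtain ⟨i, -, ⟨j, hij, hjn, hv⟩, -⟩ := ex1 (by omega)
      have hle := ub2 i j hij hjn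
      rcases Nat.eq_zero_or_pos st2.1 with h0' | hpos'
      · omega
      · obtain ⟨i', -, ⟨j', hij', hjn', hv'⟩, -⟩ := ex2 (by omega)
        have := ub1 i' j' hij' hjn'
        omega
  refine ⟨hL, fun h0 => ?_⟩
  obtain ⟨i1, he1, ⟨j1, hj1, hjn1, hv1⟩, hmin1⟩ := ex1 h0
  obtain ⟨i2, he2, ⟨j2, hj2, hjn2, hv2⟩, hmin2⟩ := ex2 (by omega)
  have a1 := hmin1 i2 j2 hj2 hjn2 (by omega)
  have a2 := hmin2 i1 j1 hj1 hjn1 (by omega)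
  omega

-- ===== table elimination (A) =====
lemma getD_set_row_ne {T : List (List Nat)} {i r : Nat} {row : List Nat} (h : r ≠ i) :
    (T.set i row).getD r [] = T.getD r [] := by
  simp [List.getD_eq_getElem?_getD, List.getElem?_set_ne (Ne.symm h)]

lemma getD_set_row_self {T : List (List Nat)} {i : Nat} {row : List Nat} (h : i < T.length) :
    (T.set i row).getD i [] = row := by
  simp [List.getD_eq_getElem?_getD, List.getElem?_set_self h]

lemma getD_set_entry_ne {row : List Nat} {j q v : Nat} (h : q ≠ j) :
    (row.set j v).getD q 0 = row.getD q 0 := by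
  simp [List.getD_eq_getElem?_getD, List.getElem?_set_ne (Ne.symm h)]

lemma getD_set_entry_self {row : List Nat} {j v : Nat} (h : j < row.length) :
    (row.set j v).getD j 0 = v := by
  simp [List.getD_eq_getElem?_getD, List.getElem?_set_self h]


def TabGood (t : List Char) (k : Nat) (T : List (List Nat)) : Prop :=
  ∀ i q, i < k → i + 1 ≤ q → q < t.length → (T.getD i []).getD q 0 = csl t i q

lemma row_fold (t : List Char) (i : Nat) (hi : i < t.length) :
    ∀ (m j0 : Nat), j0 + m = t.length → i < j0 →
    ∀ (T : List (List Nat)) (b : List Char × Nat),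
      T.length = t.length →
      (∀ r, r < t.length → (T.getD r []).length = t.length) →
      TabGood t i T →
      (∀ q, i + 1 ≤ q → q < j0 → (T.getD i []).getD q 0 = csl t i q) →
      ∃ T', (List.range' j0 m).foldl (lrsStep t i) (T, b.1, b.2) =
              (T', (((List.range' j0 m).map (fun j => (i, j))).foldl (ruleC t) b).1,
                   (((List.range' j0 m).map (fun j => (i, j))).foldl (ruleC t) b).2) ∧
        T'.length = t.length ∧ (∀ r, r < t.length → (T'.getD r []).length = t.length) ∧
        TabGood t (i+1) T' := by
  intro m
  induction m with
  | zero =>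
    intro j0 hj0 hij0 T b hTlen hrows hgood hrow
    refine ⟨T, by simp, hTlen, hrows, ?_⟩
    intro i' q hi' hq1 hq2
    rcases Nat.lt_or_ge i' i with h | h
    · exact hgood i' q h hq1 hq2
    · have : i' = i := by omega
      subst this
      exact hrow q hq1 (by omega)
  | succ k ih =>
    intro j0 hj0 hij0 T b hTlen hrows hgood hrow
    have hj0n : j0 < t.length := by omega
    have hvzero : ¬ t.getD i ' ' = t.getD j0 ' ' → csl t i j0 = 0 := by
      intro hc
      cases i with
      | zero => simp only [csl]; rw [if_neg hc]
      | succ i' => simp only [csl]; rw [if_neg hc]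
    have hwrite : t.getD i ' ' = t.getD j0 ' ' →
        (if i = 0 ∨ j0 = 0 then 1 else ((T.getD (i-1) []).getD (j0-1) 0) + 1) = csl t i j0 := by
      intro hc
      cases i with
      | zero =>
        rw [if_pos (Or.inl rfl)]
        simp only [csl]
        rw [if_pos hc]
      | succ i' =>
        have hnot : ¬ (i' + 1 = 0 ∨ j0 = 0) := by omega
        rw [if_neg hnot]
        have hprev := hgood i' (j0 - 1) (by omega) (by omega) (by omega)
        simp only [Nat.add_sub_cancel]
        rw [hprev]
        simp only [csl]
        rw [if_pos hc]
    set T' := T.set i ((T.getD i []).set j0 (csl t i j0)) with hT'def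
    have hstep : lrsStep t i (T, b.1, b.2) j0 = (T', (ruleC t b (i, j0)).1, (ruleC t b (i, j0)).2) := by
      have hpv : pairVal t (i, j0) = csl t i j0 := rfl
      by_cases hc : t.getD i ' ' = t.getD j0 ' '
      · simp only [lrsStep]
        rw [if_pos hc, hwrite hc]
        unfold ruleC
        rw [hpv]
        by_cases hbl : b.2 < csl t i j0
        · rw [if_pos hbl, if_pos hbl]
        · rw [if_neg hbl, if_neg hbl]
      · simp only [lrsStep]
        rw [if_neg hc]
        unfold ruleC
        rw [hpv, hvzero hc, if_neg (by omega)]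
        simp [hT'def, hvzero hc]
    have hTlen' : T'.length = t.length := by rw [hT'def, List.length_set]; exact hTlen
    have hrows' : ∀ r, r < t.length → (T'.getD r []).length = t.length := by
      intro r hr
      by_cases hri : r = i
      · subst hri
        rw [hT'def, getD_set_row_self (by omega), List.length_set]
        exact hrows r hr
      · rw [hT'def, getD_set_row_ne hri]
        exact hrows r hr
    have hgood' : TabGood t i T' := by
      intro i' q hi' hq1 hq2
      rw [hT'def, getD_set_row_ne (by omega)]
      exact hgood i' q hi' hq1 hq2
    have HROWQ : ∀ q, i + 1 ≤ q → q < j0 + 1 → (T'.getD i []).getD q 0 = csl t i q := by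
      intro q hq1 hq2
      rw [hT'def, getD_set_row_self (by omega)]
      by_cases hqj : q = j0
      · subst hqj
        exact getD_set_entry_self (by rw [hrows i hi]; omega)
      · rw [getD_set_entry_ne hqj]
        exact hrow q hq1 (by omega)
    rw [List.range'_succ]
    simp only [List.foldl_cons, List.map_cons]
    rw [hstep]
    exact ih (j0 + 1) (by omega) (by omega) T' (ruleC t b (i, j0)) hTlen' hrows' hgood' HROWQ

lemma outer_fold (t : List Char) :
    ∀ (m i0 : Nat), i0 + m = t.length →
    ∀ (T : List (List Nat)) (b : List Char × Nat),
      T.length = t.length →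
      (∀ r, r < t.length → (T.getD r []).length = t.length) →
      TabGood t i0 T →
      (((List.range' i0 m).foldl
          (fun st i => (List.range' (i+1) (t.length - (i+1))).foldl (lrsStep t i) st)
          (T, b.1, b.2)).2 : List Char × Nat) =
        ((List.range' i0 m).flatMap (rowPairs t.length)).foldl (ruleC t) b := by
  intro m
  induction m with
  | zero =>
    intro i0 h T b hTlen hrows hgood
    simp
  | succ k ih =>
    intro i0 h T b hTlen hrows hgood
    have hi0 : i0 < t.length := by omega
    rw [List.range'_succ]
    simp only [List.foldl_cons, List.flatMap_cons, List.foldl_append]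
    obtain ⟨T', heq, hlen', hrows', hgood'⟩ :=
      row_fold t i0 hi0 (t.length - (i0+1)) (i0+1) (by omega) (by omega) T b hTlen hrows hgood
        (fun q h1 h2 => absurd h1 (by omega))
    have hrp : rowPairs t.length i0 = (List.range' (i0+1) (t.length - (i0+1))).map (fun j => (i0, j)) := rfl
    rw [hrp, heq]
    exact ih (i0+1) (by omega) T' _ hlen' hrows' hgood'

lemma lrs_eq_fold (t : List Char) :
    lrs t = ((pairsRow t.length).foldl (ruleC t) ([], 0)).1 := by
  simp only [lrs, pairsRow]
  rw [List.range_eq_range']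
  have h := outer_fold t t.length 0 (by omega)
    (List.replicate t.length (List.replicate t.length 0)) ([], 0)
    (by simp)
    (fun r hr => by simp [List.getD_eq_getElem?_getD, hr])
    (fun i' q h _ _ => absurd h (by omega))
  exact congrArg Prod.fst h

-- ruleC is renderA of ruleA
lemma foldC_eq_render (t : List Char) : ∀ (ps : List (Nat × Nat)) (st : Nat × Int),
    ps.foldl (ruleC t) (renderA t st) = renderA t (ps.foldl (ruleA t) st) := by
  intro ps
  induction ps with
  | nil => intro st; rfl
  | cons p rest ih =>
    intro st
    simp only [List.foldl_cons]
    have hcomm : ruleC t (renderA t st) p = renderA t (ruleA t st p) := by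
      unfold ruleC ruleA renderA
      simp only
      by_cases hlt : st.1 < pairVal t p
      · rw [if_pos hlt, if_pos hlt]
        have hv_le : pairVal t p ≤ p.1 + 1 := csl_le t p.1 p.2
        have hne : ¬ pairVal t p = 0 := by omega
        rw [if_neg hne]
        have hcast1 : (p.1 : Int) - (pairVal t p : Int) + 1 = ((p.1 + 1 - pairVal t p : Nat) : Int) := by
          omega
        have hcast2 : (p.1 : Int) + 1 = ((p.1 + 1 : Nat) : Int) := by omega
        rw [hcast1, hcast2, PySem.List.slice_natCast]
        unfold extract
        have harith : p.1 + 1 - (p.1 + 1 - pairVal t p) = pairVal t p := by omega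
        rw [harith]
        simp
      · rw [if_neg hlt, if_neg hlt]
    rw [hcomm]
    exact ih _

-- ===== diagonal fold (B) =====
lemma ruleB_inv {t : List Char} {st : Nat × Int} {p : Nat × Nat}
    (h : st.1 = 0 → st.2 < 0) : (ruleB t st p).1 = 0 → (ruleB t st p).2 < 0 := by
  unfold ruleB
  split
  next hc =>
    intro h0
    simp only at h0
    rcases hc with hlt | ⟨heq, hlt2⟩
    · omega
    · have := h (by omega)
      have : (0:Int) ≤ (p.1 : Int) := Int.natCast_nonneg _
      omega
  next _ => exact h

lemma foldB_inv {t : List Char} : ∀ (ps : List (Nat × Nat)) (st : Nat × Int),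
    (st.1 = 0 → st.2 < 0) → ((ps.foldl (ruleB t) st).1 = 0 → (ps.foldl (ruleB t) st).2 < 0) := by
  intro ps
  induction ps with
  | nil => intro st h; exact h
  | cons p rest ih => intro st h; exact ih _ (ruleB_inv h)

lemma diag_fold (t : List Char) (d : Nat) :
    ∀ (m i0 : Nat) (st : Nat × Int) (run : Nat),
      (st.1 = 0 → st.2 < 0) →
      (run = if i0 = 0 then 0 else csl t (i0 - 1) (i0 - 1 + d)) →
      ((List.range' i0 m).foldl (diagStep t d) (st, run)).1 =
        ((List.range' i0 m).map (fun i => (i, i + d))).foldl (ruleB t) st := by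
  intro m
  induction m with
  | zero => intro i0 st run _ _; simp
  | succ k ih =>
    intro i0 st run h0 hrun
    rw [List.range'_succ]
    simp only [List.foldl_cons, List.map_cons]
    have hcsl : csl t i0 (i0 + d) = (if t.getD i0 ' ' = t.getD (i0 + d) ' ' then run + 1 else 0) := by
      cases i0 with
      | zero =>
        simp only [csl]
        simp at hrun
        simp [hrun]
      | succ j =>
        simp only [csl]
        have h2 : j + 1 + d - 1 = j + d := by omega
        rw [h2]
        simp only [Nat.succ_ne_zero, if_false] at hrun
        simp [hrun]
    by_cases hc : t.getD i0 ' ' = t.getD (i0 + d) ' '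
    · have hv : pairVal t (i0, i0 + d) = run + 1 := by
        show csl t i0 (i0 + d) = run + 1
        rw [hcsl, if_pos hc]
      simp only [diagStep]
      rw [if_pos hc]
      have hrule : ruleB t st (i0, i0 + d) =
          (if st.1 < run + 1 ∨ (run + 1 = st.1 ∧ (i0 : Int) < st.2) then ((run + 1 : Nat), (i0 : Int)) else st) := by
        simp [ruleB, hv]
      by_cases hcond : st.1 < run + 1 ∨ (run + 1 = st.1 ∧ (i0 : Int) < st.2)
      · simp only [hcond, if_true]
        rw [ih (i0+1) ((run+1 : Nat), (i0 : Int)) (run+1) (by simp) (by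
          simp only [Nat.succ_ne_zero, if_false]
          have h1 : i0 + 1 - 1 = i0 := by omega
          rw [h1, hcsl, if_pos hc])]
        rw [hrule, if_pos hcond]
      · simp only [hcond, if_false]
        rw [ih (i0+1) st (run+1) h0 (by
          simp only [Nat.succ_ne_zero, if_false]
          have h1 : i0 + 1 - 1 = i0 := by omega
          rw [h1, hcsl, if_pos hc])]
        rw [hrule, if_neg hcond]
    · have hv : pairVal t (i0, i0 + d) = 0 := by
        show csl t i0 (i0 + d) = 0
        rw [hcsl, if_neg hc]
      simp only [diagStep]
      rw [if_neg hc]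
      have hrule : ruleB t st (i0, i0 + d) = st := by
        unfold ruleB
        rw [if_neg]
        rw [hv]
        intro hcc
        rcases hcc with hlt | ⟨heq, hlt2⟩
        · omega
        · have := h0 (by omega)
          have : (0:Int) ≤ (i0 : Int) := Int.natCast_nonneg _
          omega
      rw [ih (i0+1) st 0 h0 (by
        simp only [Nat.succ_ne_zero, if_false]
        have h1 : i0 + 1 - 1 = i0 := by omega
        rw [h1, hcsl, if_neg hc])]
      rw [hrule]

lemma bestRepeat_eq_fold_aux (t : List Char) : ∀ (ds : List Nat) (st : Nat × Int),
    (st.1 = 0 → st.2 < 0) →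
    ds.foldl (fun bb d => ((List.range (t.length - d)).foldl (diagStep t d) (bb, 0)).1) st =
      (ds.flatMap (fun d => (List.range (t.length - d)).map (fun i => (i, i + d)))).foldl (ruleB t) st := by
  intro ds
  induction ds with
  | nil => intro st _; simp
  | cons d rest ih =>
    intro st h0
    simp only [List.foldl_cons, List.flatMap_cons, List.foldl_append]
    have hd : ((List.range (t.length - d)).foldl (diagStep t d) (st, 0)).1 =
        ((List.range (t.length - d)).map (fun i => (i, i + d))).foldl (ruleB t) st := by
      rw [List.range_eq_range']
      exact diag_fold t d (t.length - d) 0 st 0 h0 (by simp)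
    rw [hd, ih _ (foldB_inv _ _ h0)]

lemma bestRepeat_eq_fold (t : List Char) :
    bestRepeat t = (pairsDiag t.length).foldl (ruleB t) (0, -1) := by
  unfold bestRepeat pairsDiag
  exact bestRepeat_eq_fold_aux t (List.range' 1 (t.length - 1)) (0, -1) (by norm_num)

-- order-free best property of both final states
lemma pball_of_pb {t : List Char} {ps : List (Nat × Nat)} {st : Nat × Int}
    (hmem : ∀ p : Nat × Nat, p ∈ ps ↔ p.1 < p.2 ∧ p.2 < t.length) (h : PB t ps st) : PBall t st := by
  obtain ⟨ub, ex⟩ := h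
  refine ⟨fun i j hij hjn => ub (i, j) ((hmem _).2 ⟨hij, hjn⟩), fun h0 => ?_⟩
  obtain ⟨i, hi, ⟨p, hp, hpi, hpv⟩, hmin⟩ := ex h0
  have hmemp := (hmem p).1 hp
  refine ⟨i, hi, ⟨p.2, ?_, ?_, ?_⟩, ?_⟩
  · omega
  · omega
  · simpa [pairVal, hpi] using hpv
  · intro i' j' hij' hjn' hv'
    exact hmin (i', j') ((hmem _).2 ⟨hij', hjn'⟩) (by simpa [pairVal] using hv')

lemma bestRepeat_PBall (t : List Char) : PBall t (bestRepeat t) := by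
  rw [bestRepeat_eq_fold]
  refine pball_of_pb (fun p => mem_pairsDiag) ?_
  have := foldB_PB t (pairsDiag t.length) [] (0, -1) ⟨by simp, fun h => absurd rfl h⟩
  simpa using this

lemma lrsAbs_PBall (t : List Char) : PBall t ((pairsRow t.length).foldl (ruleA t) (0, 0)) := by
  refine pball_of_pb (fun p => mem_pairsRow) ?_
  have := foldA_PB t (pairsRow t.length) [] (0, 0)
    (by simpa using pairsRow_sorted t.length) ⟨by simp, fun h => absurd rfl h⟩
  simpa using this

lemma lrs_eq_render (t : List Char) :
    lrs t = (renderA t ((pairsRow t.length).foldl (ruleA t) (0, 0))).1 := by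
  rw [lrs_eq_fold]
  have h0 : renderA t ((0 : Nat), (0 : Int)) = ([], 0) := by simp [renderA]
  rw [← h0, foldC_eq_render t]

-- ===== first-occurrence facts =====
lemma le_csl_of_window (t : List Char) :
    ∀ (L p q : Nat), 0 < L → p < q → q + L ≤ t.length →
      (∀ k, k < L → t.getD (p + k) ' ' = t.getD (q + k) ' ') →
      L ≤ csl t (p + L - 1) (q + L - 1) := by
  intro L
  induction L with
  | zero => intro p q h; omega
  | succ K ih =>
    intro p q hL hpq hqn hw
    cases K with
    | zero =>
      have hc := hw 0 (by omega)
      simp only [Nat.add_zero] at hc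
      have hp : p + 1 - 1 = p := by omega
      have hq : q + 1 - 1 = q := by omega
      rw [hp, hq]
      cases p with
      | zero => simp only [csl]; rw [if_pos hc]
      | succ p' => simp only [csl]; rw [if_pos hc]; omega
    | succ K' =>
      have hc := hw (K' + 1) (by omega)
      have e0 : p + (K' + 1) = p + K' + 1 := by omega
      have e0' : q + (K' + 1) = q + K' + 1 := by omega
      rw [e0, e0'] at hc
      have e1 : p + (K' + 1 + 1) - 1 = (p + K') + 1 := by omega
      have e2 : q + (K' + 1 + 1) - 1 = (q + K') + 1 := by omega
      rw [e1, e2]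
      simp only [csl]
      rw [if_pos hc]
      have e3 : q + K' + 1 - 1 = q + K' := by omega
      rw [e3]
      have ihh := ih p q (by omega) hpq (by omega) (fun k hk => hw k (by omega))
      have e4 : p + (K' + 1) - 1 = p + K' := by omega
      have e5 : q + (K' + 1) - 1 = q + K' := by omega
      rw [e4, e5] at ihh
      omega

-- the step taken by one loop iteration is the same list on both sides
lemma step_eq (t : List Char) :
    (lrs t).length = (bestRepeat t).1 ∧
    (2 < (bestRepeat t).1 →
      replaceFirst t (lrs t) =
        PySem.List.slice t none (some ((bestRepeat t).2 - ((bestRepeat t).1 : Int) + 1)) ++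
        PySem.List.slice t (some ((bestRepeat t).2 - ((bestRepeat t).1 : Int) + 1 + ((bestRepeat t).1 : Int))) none) := by
  have hA := lrsAbs_PBall t
  have hB := bestRepeat_PBall t
  obtain ⟨hLeq, hEeq⟩ := best_unique hA hB
  constructor
  · rw [lrs_eq_render]
    by_cases h0 : ((pairsRow t.length).foldl (ruleA t) (0, 0)).1 = 0
    · simp only [renderA, if_pos h0]
      simp [← hLeq, h0]
    · obtain ⟨i, hi2, ⟨j, hij, hjn, hv⟩, hmin⟩ := hA.2 h0
      have hLle : ((pairsRow t.length).foldl (ruleA t) (0, 0)).1 ≤ i + 1 := hv ▸ csl_le t i j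
      simp only [renderA, if_neg h0]
      rw [hi2]
      simp only [Int.toNat_natCast]
      unfold extract
      rw [List.length_take, List.length_drop]
      omega
  · intro h2
    have h0 : (bestRepeat t).1 ≠ 0 := by omega
    obtain ⟨i, hi2, ⟨j, hij, hjn, hv⟩, hmin⟩ := hB.2 h0
    have hLle : (bestRepeat t).1 ≤ i + 1 := hv ▸ csl_le t i j
    have hin : i < t.length := by omega
    have h0A : ¬ ((pairsRow t.length).foldl (ruleA t) (0, 0)).1 = 0 := by omega
    have hsub : lrs t = extract t i (bestRepeat t).1 := by
      rw [lrs_eq_render]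
      simp only [renderA, if_neg h0A]
      rw [hEeq (by omega), hi2]
      simp only [Int.toNat_natCast]
      rw [hLeq]
    have hsublen : (extract t i (bestRepeat t).1).length = (bestRepeat t).1 := by
      unfold extract
      rw [List.length_take, List.length_drop]
      omega
    have hocc : extract t i (bestRepeat t).1 <+: t.drop (i + 1 - (bestRepeat t).1) :=
      List.take_prefix _ _
    have hno : ∀ p', p' < i + 1 - (bestRepeat t).1 → ¬ extract t i (bestRepeat t).1 <+: t.drop p' := by
      intro p' hp' hpre
      have htake : extract t i (bestRepeat t).1 = (t.drop p').take (bestRepeat t).1 := by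
        have h := List.prefix_iff_eq_take.1 hpre
        rw [hsublen] at h
        exact h
      have hwindow : ∀ k, k < (bestRepeat t).1 →
          t.getD (p' + k) ' ' = t.getD ((i + 1 - (bestRepeat t).1) + k) ' ' := by
        intro k hk
        have h1 : ((t.drop p').take (bestRepeat t).1)[k]? = (t.drop p')[k]? := by
          rw [List.getElem?_take, if_pos hk]
        have h2 : ((t.drop (i + 1 - (bestRepeat t).1)).take (bestRepeat t).1)[k]? =
            (t.drop (i + 1 - (bestRepeat t).1))[k]? := by
          rw [List.getElem?_take, if_pos hk]
        have h3 : (t.drop p')[k]? = (t.drop (i + 1 - (bestRepeat t).1))[k]? := by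
          rw [← h1, ← h2, ← htake]
          rfl
        simp only [List.getElem?_drop] at h3
        simp [List.getD_eq_getElem?_getD, h3]
      have hcsl := le_csl_of_window t (bestRepeat t).1 p' (i + 1 - (bestRepeat t).1)
        (by omega) (by omega) (by omega) hwindow
      have he : i + 1 - (bestRepeat t).1 + (bestRepeat t).1 - 1 = i := by omega
      rw [he] at hcsl
      have hub := hB.1 (p' + (bestRepeat t).1 - 1) i (by omega) hin
      have hge := hmin (p' + (bestRepeat t).1 - 1) i (by omega) hin (by omega)
      omega
    have hinf : extract t i (bestRepeat t).1 <:+: t :=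
      (hocc.isInfix).trans ((List.drop_suffix _ t).isInfix)
    have hfind0 : 0 ≤ PySem.Chars.find t (extract t i (bestRepeat t).1) :=
      (PySem.Chars.find_nonneg_iff _ _).2 hinf
    obtain ⟨hfpre, hfmin⟩ := PySem.Chars.find_spec hfind0
    have hka : (PySem.Chars.find t (extract t i (bestRepeat t).1)).toNat = i + 1 - (bestRepeat t).1 := by
      by_contra hne
      rcases Nat.lt_or_ge (PySem.Chars.find t (extract t i (bestRepeat t).1)).toNat
          (i + 1 - (bestRepeat t).1) with hlt | hge
      · exact hno _ hlt hfpre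
      · exact hfmin _ (by omega) hocc
    rw [hsub]
    simp only [replaceFirst]
    rw [if_neg (by omega), hka, hsublen]
    have hcast : (bestRepeat t).2 - ((bestRepeat t).1 : Int) + 1 = ((i + 1 - (bestRepeat t).1 : Nat) : Int) := by
      rw [hi2]; omega
    rw [hcast, PySem.List.slice_to_natCast]
    have hcast2 : ((i + 1 - (bestRepeat t).1 : Nat) : Int) + ((bestRepeat t).1 : Int) =
        ((i + 1 - (bestRepeat t).1 + (bestRepeat t).1 : Nat) : Int) := by omega
    rw [hcast2, PySem.List.slice_from_natCast]

lemma loop_eq : ∀ (fuel : Nat) (s : List Char), removeLoopA fuel s = removeLoopB fuel s := by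
  intro fuel
  induction fuel with
  | zero => intro s; rfl
  | succ f ih =>
    intro s
    have hs := step_eq s
    simp only [removeLoopA, removeLoopB]
    rw [hs.1]
    by_cases hc : 2 < (bestRepeat s).1
    · rw [if_pos hc, if_pos hc, hs.2 hc, ih]
    · rw [if_neg hc, if_neg hc]

-- ===== VERDICT (by name: the statement is the Claim_ definition above) =====
theorem remove_repeated_substrings_spec : Claim_equal_remove_repeated_substrings := by
  intro s _
  unfold Spec_remove_repeated_substrings remove_repeated_substrings remove_repeated_substrings_alt
  rw [loop_eq]
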